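-- pv_equiv track=rewrite | github.com/BouRHooD/mp2022_224-322_Python | HomeWork/_3_HomeWork/labDrawMaze.py | create_wall
-- ===== SOURCE A (Python) =====
-- block_wall  = "██"
--
-- def create_wall(matrix):
--     res = matrix
--     if len(matrix) == 0:
--         return res
--
--     row_begin = 0
--     row_end   = len(matrix) - 1
--     col_begin = 0
--     col_end   = len(matrix[0]) - 1
--
--     select_block = block_wall
--     while row_begin <= row_end and col_begin <= col_end:
--         # Идем вправо
--         for i in range(col_begin, col_end + 1):
--             res[row_begin][i] = select_block
--         row_begin += 1
--
--         # Идем вниз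
--         for i in range(row_begin, row_end + 1):
--             res[i][col_end] = select_block
--         col_end -= 1
--
--         # Идем влево
--         if row_begin <= row_end:
--             for i in range(col_end, col_begin - 1, -1):
--                 res[row_end][i] = select_block
--         row_end -= 1
--
--         # Идем вверх
--         if col_begin <= col_end:
--             for i in range(row_end, row_begin - 1, -1):
--                 res[i][col_begin] = select_block
--         col_begin += 1
--         break
--
--     return res
-- ===== SOURCE B (Python) =====
-- block_wall = "██"
--
-- # Direct border fill (mutates matrix in place, like A): top/bottom rows in one
-- # pass over the columns, left/right columns in one pass over the rows.
-- def create_wall(matrix):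
--     rows = len(matrix)
--     if rows == 0:
--         return matrix
--     cols = len(matrix[0])
--     if cols == 0:
--         return matrix
--     for j in range(cols):
--         matrix[0][j] = block_wall
--         matrix[rows - 1][j] = block_wall
--     for i in range(rows):
--         matrix[i][0] = block_wall
--         matrix[i][cols - 1] = block_wall
--     return matrix
-- ===== Notes on version B (the rewrite author's own statement) =====
-- stated objective: simpler
-- what changed: Replaces the spiral boundary-shrinking walk (while with an unconditional break, four shrinking bounds and two guards) by a direct border fill: one pass over the columns writing the top and bottom rows and one pass over the rows writing the left and right columns, with an explicit empty-first-row guard.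
import Mathlib
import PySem

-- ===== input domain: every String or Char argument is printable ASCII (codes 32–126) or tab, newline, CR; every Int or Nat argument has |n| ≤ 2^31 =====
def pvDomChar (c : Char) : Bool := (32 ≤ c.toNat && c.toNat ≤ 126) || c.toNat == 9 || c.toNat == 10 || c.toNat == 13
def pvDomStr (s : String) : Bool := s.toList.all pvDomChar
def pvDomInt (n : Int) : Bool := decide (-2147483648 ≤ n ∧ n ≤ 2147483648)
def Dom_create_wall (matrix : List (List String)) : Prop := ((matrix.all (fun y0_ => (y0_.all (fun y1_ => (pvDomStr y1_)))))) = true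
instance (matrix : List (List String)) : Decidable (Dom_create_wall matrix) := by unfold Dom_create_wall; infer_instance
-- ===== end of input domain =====

-- B replaces A's spiral boundary-shrinking walk by a direct border fill (objective: simpler).
-- Both Pythons mutate `matrix` in place; the theorems here are about the return value (on Pre_ the
-- final mutated state coincides with it).

-- ===== PORT A =====
def wallBlock : String := "██"

-- Python `m[i][j] = v`: exact where both indexes are in range; a no-op where Python raises
-- IndexError (such inputs lie outside Pre_create_wall).
def setCell (m : List (List String)) (i j : Int) (v : String) : List (List String) :=
  PySem.List.pySetD m i (PySem.List.pySetD (PySem.List.pyGetD m i []) j v)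

def create_wall (matrix : List (List String)) : List (List String) :=
  let res := matrix
  if matrix.length = 0 then res
  else
    let row_begin : Int := 0
    let row_end : Int := (matrix.length : Int) - 1
    let col_begin : Int := 0
    let col_end : Int := ((PySem.List.pyGetD matrix 0 []).length : Int) - 1
    -- `while row_begin <= row_end and col_begin <= col_end:` whose body ends in an
    -- unconditional `break`: the loop body runs at most once
    if row_begin ≤ row_end ∧ col_begin ≤ col_end then
      let res := (PySem.List.pyRange col_begin (col_end + 1) 1).foldl
        (fun m i => setCell m row_begin i wallBlock) res
      let row_begin := row_begin + 1
      let res := (PySem.List.pyRange row_begin (row_end + 1) 1).foldl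
        (fun m i => setCell m i col_end wallBlock) res
      let col_end := col_end - 1
      let res := if row_begin ≤ row_end then
          (PySem.List.pyRange col_end (col_begin - 1) (-1)).foldl
            (fun m i => setCell m row_end i wallBlock) res
        else res
      let row_end := row_end - 1
      let res := if col_begin ≤ col_end then
          (PySem.List.pyRange row_end (row_begin - 1) (-1)).foldl
            (fun m i => setCell m i col_begin wallBlock) res
        else res
      res
    else res

-- ===== PORT B =====
def create_wall_alt (matrix : List (List String)) : List (List String) :=
  let rows := matrix.length
  if rows = 0 then matrix
  else
    let cols := (PySem.List.pyGetD matrix 0 []).length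
    if cols = 0 then matrix
    else
      let m1 := (List.range cols).foldl
        (fun m j => setCell (setCell m 0 (j : Int) wallBlock) ((rows : Int) - 1) (j : Int) wallBlock)
        matrix
      (List.range rows).foldl
        (fun m i => setCell (setCell m (i : Int) 0 wallBlock) (i : Int) ((cols : Int) - 1) wallBlock)
        m1

-- ===== PRECONDITION & SPEC =====
-- Pre_ excludes exactly the ragged matrices on which A raises IndexError: a row after the first
-- that is shorter than the first row (A writes column len(matrix[0])-1 of every such row).
def Pre_create_wall (matrix : List (List String)) : Prop :=
  ∀ row ∈ matrix.tail, (PySem.List.pyGetD matrix 0 []).length ≤ row.length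
instance (matrix : List (List String)) : Decidable (Pre_create_wall matrix) := by
  unfold Pre_create_wall; infer_instance

def pvWitness_create_wall : List (List String) := [["a", "b"], ["c", "d"]]

def Spec_create_wall (matrix : List (List String)) (out : List (List String)) : Prop :=
  out = create_wall_alt matrix
instance (matrix : List (List String)) (out : List (List String)) :
    Decidable (Spec_create_wall matrix out) := by unfold Spec_create_wall; infer_instance

-- ===== CLAIM (what is proved, stated in full; the proofs are below) =====
def Claim_equal_create_wall : Prop :=
  ∀ (matrix : List (List String)), Dom_create_wall matrix → Pre_create_wall matrix →
    Spec_create_wall matrix (create_wall matrix)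

-- ===== LEMMAS AND PROOFS =====

-- entry (a,b) of a matrix, as an Option
def getE (m : List (List String)) (a b : Nat) : Option String := (m.getD a [])[b]?

-- fold writing wallBlock at a list of (row, col) cells
def writeCells (m : List (List String)) (ps : List (Nat × Nat)) : List (List String) :=
  ps.foldl (fun m p => setCell m (p.1 : Int) (p.2 : Int) wallBlock) m

theorem length_setCell (m : List (List String)) (i j : Int) (v : String) :
    (setCell m i j v).length = m.length := by
  simp [setCell, PySem.List.length_pySetD]

theorem length_writeCells (m : List (List String)) (ps : List (Nat × Nat)) :
    (writeCells m ps).length = m.length := by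
  induction ps generalizing m with
  | nil => rfl
  | cons p ps ih => rw [writeCells, List.foldl_cons, ← writeCells, ih, length_setCell]

theorem getE_setCell (m : List (List String)) (i j : Int) (hi : 0 ≤ i) (hj : 0 ≤ j)
    (v : String) (a b : Nat) :
    getE (setCell m i j v) a b =
      if (a : Int) = i ∧ (b : Int) = j then (getE m a b).map (fun _ => v) else getE m a b := by
  obtain ⟨i', rfl⟩ : ∃ n : Nat, (n : Int) = i := ⟨i.toNat, Int.toNat_of_nonneg hi⟩
  obtain ⟨j', rfl⟩ : ∃ n : Nat, (n : Int) = j := ⟨j.toNat, Int.toNat_of_nonneg hj⟩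
  unfold setCell getE
  simp only [PySem.List.pySetD_natCast, PySem.List.pyGetD_natCast, Nat.cast_inj,
    List.getD_eq_getElem?_getD, List.getElem?_set]
  by_cases hai : a = i'
  · subst hai
    rw [if_pos rfl]
    by_cases hlen : a < m.length
    · rw [if_pos hlen, Option.getD_some, List.getElem?_set]
      by_cases hbj : b = j'
      · subst hbj
        rw [if_pos rfl]
        by_cases hrow : b < ((m[a]?).getD []).length
        · rw [if_pos hrow, if_pos ⟨rfl, rfl⟩, List.getElem?_eq_getElem hrow]
          rfl
        · rw [if_neg hrow, if_pos ⟨rfl, rfl⟩, List.getElem?_eq_none_iff.mpr (by omega)]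
          rfl
      · rw [if_neg (fun h => hbj h.symm), if_neg (fun h => hbj h.2)]
    · rw [if_neg hlen]
      have hnone : m[a]? = none := List.getElem?_eq_none_iff.mpr (by omega)
      rw [hnone]
      split_ifs <;> simp
  · rw [if_neg (fun h => hai h.symm), if_neg (fun h => hai h.1)]

theorem getE_writeCells (ps : List (Nat × Nat)) (m : List (List String)) (a b : Nat) :
    getE (writeCells m ps) a b =
      if (a, b) ∈ ps then (getE m a b).map (fun _ => wallBlock) else getE m a b := by
  induction ps generalizing m with
  | nil => simp [writeCells]
  | cons p ps ih =>
    rw [writeCells, List.foldl_cons, ← writeCells, ih,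
      getE_setCell _ _ _ (by positivity) (by positivity)]
    have hpq : ((a : Int) = (p.1 : Int) ∧ (b : Int) = (p.2 : Int)) ↔ (a, b) = p := by
      rcases p with ⟨p1, p2⟩
      simp [Prod.ext_iff]
    simp only [if_congr hpq rfl rfl]
    by_cases h2 : (a, b) ∈ ps
    · rw [if_pos h2, if_pos (List.mem_cons.mpr (Or.inr h2))]
      by_cases h1 : (a, b) = p
      · rw [if_pos h1]; cases getE m a b <;> rfl
      · rw [if_neg h1]
    · rw [if_neg h2]
      by_cases h1 : (a, b) = p
      · rw [if_pos h1, if_pos (List.mem_cons.mpr (Or.inl h1))]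
      · rw [if_neg h1, if_neg (by simp [List.mem_cons, h1, h2])]

theorem writeCells_writeCells (m : List (List String)) (ps qs : List (Nat × Nat)) :
    writeCells (writeCells m ps) qs = writeCells m (ps ++ qs) := by
  rw [writeCells, writeCells, writeCells, List.foldl_append]

theorem writeCells_ext (m : List (List String)) (ps qs : List (Nat × Nat))
    (h : ∀ a b : Nat, (a, b) ∈ ps ↔ (a, b) ∈ qs) : writeCells m ps = writeCells m qs := by
  have hget : ∀ rs : List (Nat × Nat), ∀ a b : Nat, ∀ ha : a < m.length,
      ((writeCells m rs)[a]'(by rw [length_writeCells]; exact ha) : List String)[b]?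
        = getE (writeCells m rs) a b := by
    intro rs a b ha
    rw [getE, List.getD_eq_getElem?_getD,
      List.getElem?_eq_getElem (show a < (writeCells m rs).length by rw [length_writeCells]; exact ha)]
    rfl
  apply List.ext_getElem?
  intro a
  by_cases ha : a < m.length
  · rw [List.getElem?_eq_getElem (by rw [length_writeCells]; omega),
      List.getElem?_eq_getElem (by rw [length_writeCells]; omega)]
    congr 1
    apply List.ext_getElem?
    intro b
    rw [hget ps a b ha, hget qs a b ha, getE_writeCells, getE_writeCells,
      if_congr (h a b) rfl rfl]
  · rw [List.getElem?_eq_none_iff.mpr (by rw [length_writeCells]; omega),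
      List.getElem?_eq_none_iff.mpr (by rw [length_writeCells]; omega)]

-- converting A's row/column folds to writeCells
theorem convA_row (L : List Int) (r : Int) (hr : 0 ≤ r) (hL : ∀ x ∈ L, 0 ≤ x)
    (m : List (List String)) :
    L.foldl (fun m i => setCell m r i wallBlock) m
      = writeCells m (L.map (fun i => (r.toNat, i.toNat))) := by
  induction L generalizing m with
  | nil => rfl
  | cons x xs ih =>
    have hx : 0 ≤ x := hL x List.mem_cons_self
    have hxs : ∀ y ∈ xs, 0 ≤ y := fun y hy => hL y (List.mem_cons_of_mem x hy)
    have ih' := ih hxs (setCell m r x wallBlock)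
    simp only [writeCells, List.map_cons, List.foldl_cons, Int.toNat_of_nonneg hr,
      Int.toNat_of_nonneg hx] at ih' ⊢
    exact ih'

theorem convA_col (L : List Int) (c : Int) (hc : 0 ≤ c) (hL : ∀ x ∈ L, 0 ≤ x)
    (m : List (List String)) :
    L.foldl (fun m i => setCell m i c wallBlock) m
      = writeCells m (L.map (fun i => (i.toNat, c.toNat))) := by
  induction L generalizing m with
  | nil => rfl
  | cons x xs ih =>
    have hx : 0 ≤ x := hL x List.mem_cons_self
    have hxs : ∀ y ∈ xs, 0 ≤ y := fun y hy => hL y (List.mem_cons_of_mem x hy)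
    have ih' := ih hxs (setCell m x c wallBlock)
    simp only [writeCells, List.map_cons, List.foldl_cons, Int.toNat_of_nonneg hc,
      Int.toNat_of_nonneg hx] at ih' ⊢
    exact ih'

-- converting B's two folds to writeCells
theorem convB1 (L : List Nat) (R : Nat) (hR : 1 ≤ R) (m : List (List String)) :
    L.foldl (fun m j => setCell (setCell m 0 (j : Int) wallBlock) ((R : Int) - 1) (j : Int) wallBlock) m
      = writeCells m (L.flatMap (fun j => [((0 : Nat), j), (R - 1, j)])) := by
  induction L generalizing m with
  | nil => rfl
  | cons x xs ih =>
    have e : ((R - 1 : Nat) : Int) = (R : Int) - 1 := by omega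
    have ih' := ih (setCell (setCell m 0 (x : Int) wallBlock) ((R : Int) - 1) (x : Int) wallBlock)
    simp only [writeCells, List.flatMap_cons, List.foldl_append, List.foldl_cons,
      List.foldl_nil, e, Nat.cast_zero] at ih' ⊢
    exact ih'

theorem convB2 (L : List Nat) (C : Nat) (hC : 1 ≤ C) (m : List (List String)) :
    L.foldl (fun m i => setCell (setCell m (i : Int) 0 wallBlock) (i : Int) ((C : Int) - 1) wallBlock) m
      = writeCells m (L.flatMap (fun i => [(i, (0 : Nat)), (i, C - 1)])) := by
  induction L generalizing m with
  | nil => rfl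
  | cons x xs ih =>
    have e : ((C - 1 : Nat) : Int) = (C : Int) - 1 := by omega
    have ih' := ih (setCell (setCell m (x : Int) 0 wallBlock) (x : Int) ((C : Int) - 1) wallBlock)
    simp only [writeCells, List.flatMap_cons, List.foldl_append, List.foldl_cons,
      List.foldl_nil, e, Nat.cast_zero] at ih' ⊢
    exact ih'

-- membership characterisations
theorem memRow (lo hi r : Int) (hr : 0 ≤ r) (hlo : 0 ≤ lo) (a b : Nat) :
    ((a, b) ∈ (PySem.List.pyRange lo hi 1).map (fun i => (r.toNat, i.toNat))) ↔
      ((a : Int) = r ∧ lo ≤ (b : Int) ∧ (b : Int) < hi) := by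
  simp only [List.mem_map, PySem.List.mem_pyRange_one, Prod.mk.injEq]
  constructor
  · rintro ⟨x, ⟨h1, h2⟩, ha, hb⟩
    omega
  · rintro ⟨ha, hlo, hhi⟩
    exact ⟨(b : Int), ⟨hlo, hhi⟩, by omega, by omega⟩

theorem memRowNeg (lo hi r : Int) (hr : 0 ≤ r) (hhi : -1 ≤ hi) (a b : Nat) :
    ((a, b) ∈ (PySem.List.pyRange lo hi (-1)).map (fun i => (r.toNat, i.toNat))) ↔
      ((a : Int) = r ∧ hi < (b : Int) ∧ (b : Int) ≤ lo) := by
  simp only [List.mem_map, PySem.List.mem_pyRange_neg_one, Prod.mk.injEq]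
  constructor
  · rintro ⟨x, ⟨h1, h2⟩, ha, hb⟩
    omega
  · rintro ⟨ha, hlo, hhi'⟩
    exact ⟨(b : Int), ⟨hlo, hhi'⟩, by omega, by omega⟩

theorem memCol (lo hi c : Int) (hc : 0 ≤ c) (hlo : 0 ≤ lo) (a b : Nat) :
    ((a, b) ∈ (PySem.List.pyRange lo hi 1).map (fun i => (i.toNat, c.toNat))) ↔
      (lo ≤ (a : Int) ∧ (a : Int) < hi ∧ (b : Int) = c) := by
  simp only [List.mem_map, PySem.List.mem_pyRange_one, Prod.mk.injEq]
  constructor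
  · rintro ⟨x, ⟨h1, h2⟩, ha, hb⟩
    omega
  · rintro ⟨hlo, hhi, hb⟩
    exact ⟨(a : Int), ⟨hlo, hhi⟩, by omega, by omega⟩

theorem memColNeg (lo hi c : Int) (hc : 0 ≤ c) (hhi : -1 ≤ hi) (a b : Nat) :
    ((a, b) ∈ (PySem.List.pyRange lo hi (-1)).map (fun i => (i.toNat, c.toNat))) ↔
      (hi < (a : Int) ∧ (a : Int) ≤ lo ∧ (b : Int) = c) := by
  simp only [List.mem_map, PySem.List.mem_pyRange_neg_one, Prod.mk.injEq]
  constructor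
  · rintro ⟨x, ⟨h1, h2⟩, ha, hb⟩
    omega
  · rintro ⟨hlo, hhi', hb⟩
    exact ⟨(a : Int), ⟨hlo, hhi'⟩, by omega, by omega⟩

theorem memB1 (C R : Nat) (a b : Nat) :
    ((a, b) ∈ (List.range C).flatMap (fun j => [((0 : Nat), j), (R - 1, j)])) ↔
      ((a = 0 ∨ a = R - 1) ∧ b < C) := by
  simp only [List.mem_flatMap, List.mem_range, List.mem_cons, List.not_mem_nil,
    or_false, Prod.mk.injEq]
  constructor
  · rintro ⟨x, hx, h⟩
    omega
  · rintro ⟨h, hb⟩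
    exact ⟨b, hb, by omega⟩

theorem memB2 (R C : Nat) (a b : Nat) :
    ((a, b) ∈ (List.range R).flatMap (fun i => [(i, (0 : Nat)), (i, C - 1)])) ↔
      (a < R ∧ (b = 0 ∨ b = C - 1)) := by
  simp only [List.mem_flatMap, List.mem_range, List.mem_cons, List.not_mem_nil,
    or_false, Prod.mk.injEq]
  constructor
  · rintro ⟨x, hx, h⟩
    omega
  · rintro ⟨ha, h⟩
    exact ⟨a, ha, by omega⟩

-- ===== VERDICT (by name: the statement is the Claim_ definition above) =====
theorem create_wall_spec : Claim_equal_create_wall := by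
  intro matrix _ hpre
  show create_wall matrix = create_wall_alt matrix
  by_cases hR : matrix.length = 0
  · simp only [create_wall, create_wall_alt, if_pos hR]
  · have hR1 : 1 ≤ matrix.length := Nat.pos_of_ne_zero hR
    by_cases hC0 : (PySem.List.pyGetD matrix 0 []).length = 0
    · simp only [create_wall, create_wall_alt]
      rw [if_neg hR, if_neg hR, if_pos hC0,
        if_neg (show ¬((0:Int) ≤ (matrix.length : Int) - 1 ∧
          (0:Int) ≤ ((PySem.List.pyGetD matrix 0 []).length : Int) - 1) by intro h; omega)]
    · have hC1 : 1 ≤ (PySem.List.pyGetD matrix 0 []).length := Nat.pos_of_ne_zero hC0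
      simp only [create_wall, create_wall_alt]
      rw [if_neg hR, if_neg hR, if_neg hC0,
        if_pos (show ((0:Int) ≤ (matrix.length : Int) - 1 ∧
          (0:Int) ≤ ((PySem.List.pyGetD matrix 0 []).length : Int) - 1) from ⟨by omega, by omega⟩)]
      rw [convB1 _ _ hR1, convB2 _ _ hC1, writeCells_writeCells]
      by_cases h3 : (0:Int) + 1 ≤ (matrix.length : Int) - 1
      · by_cases h4 : (0:Int) ≤ ((PySem.List.pyGetD matrix 0 []).length : Int) - 1 - 1
        · rw [if_pos h3, if_pos h4,
            convA_col _ 0 le_rfl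
              (fun x hx => by have := PySem.List.mem_pyRange_neg_one.mp hx; omega),
            convA_row _ _ (by omega)
              (fun x hx => by have := PySem.List.mem_pyRange_neg_one.mp hx; omega),
            convA_col _ _ (by omega)
              (fun x hx => by have := PySem.List.mem_pyRange_one.mp hx; omega),
            convA_row _ 0 le_rfl (fun x hx => (PySem.List.mem_pyRange_one.mp hx).1),
            writeCells_writeCells, writeCells_writeCells, writeCells_writeCells]
          apply writeCells_ext
          intro a b
          simp only [List.mem_append]
          rw [memRow _ _ _ le_rfl le_rfl, memCol _ _ _ (by omega) (by omega),
            memRowNeg _ _ _ (by omega) (by omega), memColNeg _ _ _ le_rfl (by omega),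
            memB1, memB2]
          omega
        · rw [if_pos h3, if_neg h4,
            convA_row _ _ (by omega)
              (fun x hx => by have := PySem.List.mem_pyRange_neg_one.mp hx; omega),
            convA_col _ _ (by omega)
              (fun x hx => by have := PySem.List.mem_pyRange_one.mp hx; omega),
            convA_row _ 0 le_rfl (fun x hx => (PySem.List.mem_pyRange_one.mp hx).1),
            writeCells_writeCells, writeCells_writeCells]
          apply writeCells_ext
          intro a b
          simp only [List.mem_append]
          rw [memRow _ _ _ le_rfl le_rfl, memCol _ _ _ (by omega) (by omega),
            memRowNeg _ _ _ (by omega) (by omega), memB1, memB2]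
          omega
      · by_cases h4 : (0:Int) ≤ ((PySem.List.pyGetD matrix 0 []).length : Int) - 1 - 1
        · rw [if_neg h3, if_pos h4,
            convA_col _ 0 le_rfl
              (fun x hx => by have := PySem.List.mem_pyRange_neg_one.mp hx; omega),
            convA_col _ _ (by omega)
              (fun x hx => by have := PySem.List.mem_pyRange_one.mp hx; omega),
            convA_row _ 0 le_rfl (fun x hx => (PySem.List.mem_pyRange_one.mp hx).1),
            writeCells_writeCells, writeCells_writeCells]
          apply writeCells_ext
          intro a b
          simp only [List.mem_append]
          rw [memRow _ _ _ le_rfl le_rfl, memCol _ _ _ (by omega) (by omega),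
            memColNeg _ _ _ le_rfl (by omega), memB1, memB2]
          omega
        · rw [if_neg h3, if_neg h4,
            convA_col _ _ (by omega)
              (fun x hx => by have := PySem.List.mem_pyRange_one.mp hx; omega),
            convA_row _ 0 le_rfl (fun x hx => (PySem.List.mem_pyRange_one.mp hx).1),
            writeCells_writeCells]
          apply writeCells_ext
          intro a b
          simp only [List.mem_append]
          rw [memRow _ _ _ le_rfl le_rfl, memCol _ _ _ (by omega) (by omega),
            memB1, memB2]
          omega
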